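-- pv_equiv track=rewrite | github.com/jakub-krecisz/advent-of-code | year2021/day03/day3.py | getGammaRate
-- ===== SOURCE A (Python) =====
-- def binToDeci(binary):
--     return sum(val * (2 ** idx) for idx, val in enumerate(reversed(binary)))
--
-- def getGammaRate(myList):
--     gamma = [0 for _ in range(len(myList[0]))]
--     for element in myList:
--         for i in range(len(myList[0])):
--             if element[i] == '0':
--                 gamma[i] -= 1
--             else:
--                 gamma[i] += 1
--     for index in range(len(gamma)):
--         if gamma[index] <= 0:
--             gamma[index] = 0
--         else:
--             gamma[index] = 1
--
--     return binToDeci(gamma)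
-- ===== SOURCE B (Python) =====
-- def getGammaRate(myList):
--     n = len(myList)
--     value = 0
--     for i in range(len(myList[0])):
--         ones = sum(row[i] != '0' for row in myList)
--         value = 2 * value + (1 if 2 * ones > n else 0)
--     return value
-- ===== Notes on version B (the rewrite author's own statement) =====
-- stated objective: simpler
-- what changed: Column-major single pass: for each bit position count the non-'0' characters across rows and fold the majority bits into the result with Horner's rule (value = 2*value + bit), replacing A's mutable per-column counter array, the second 0/1-rewriting loop and the enumerate(reversed(...)) power-sum conversion.
import Mathlib
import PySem

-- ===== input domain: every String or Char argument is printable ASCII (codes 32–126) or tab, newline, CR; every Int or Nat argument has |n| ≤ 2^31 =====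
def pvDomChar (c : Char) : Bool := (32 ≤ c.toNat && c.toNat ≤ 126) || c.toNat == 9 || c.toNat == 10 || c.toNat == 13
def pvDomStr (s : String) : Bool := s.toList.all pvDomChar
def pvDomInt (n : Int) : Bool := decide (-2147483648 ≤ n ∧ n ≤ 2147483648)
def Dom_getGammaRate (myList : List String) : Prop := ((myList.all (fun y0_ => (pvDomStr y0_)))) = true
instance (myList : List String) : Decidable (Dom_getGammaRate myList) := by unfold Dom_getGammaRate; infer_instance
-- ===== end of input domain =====

-- B replaces A's mutable per-column counter array, second rewriting loop and power-sum
-- conversion by one column-major pass folding majority bits with Horner's rule (simpler).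


-- ===== PORT A =====
-- sum(val * (2 ** idx) for idx, val in enumerate(reversed(binary)));
-- enumerate indices are 0,1,2,…, so `2 ** idx` is ported exactly as `2 ^ idx.toNat`.
def binToDeci (binary : List Int) : Int :=
  ((PySem.List.enumerate binary.reverse).map (fun p => p.2 * 2 ^ p.1.toNat)).sum

-- element[i] is ported via toList.getD (Pre_ excludes the inputs where Python raises IndexError)
def getGammaRate (myList : List String) : Int :=
  let w := (PySem.List.pyGetD myList 0 "").toList.length
  let gamma0 : List Int := (List.range w).map (fun _ => 0)
  let gamma1 := myList.foldl (fun gamma element =>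
      (List.range w).foldl (fun g i =>
        if element.toList.getD i ' ' = '0' then g.set i (g.getD i 0 - 1)
        else g.set i (g.getD i 0 + 1)) gamma) gamma0
  let gamma2 := (List.range gamma1.length).foldl (fun g index =>
      if g.getD index 0 ≤ 0 then g.set index 0 else g.set index 1) gamma1
  binToDeci gamma2

-- ===== PORT B =====
def getGammaRate_alt (myList : List String) : Int :=
  let n : Int := myList.length
  (List.range ((PySem.List.pyGetD myList 0 "").toList.length)).foldl
    (fun value i =>
      let ones : Int := (myList.map (fun row => if row.toList.getD i ' ' ≠ '0' then (1:Int) else 0)).sum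
      2 * value + (if 2 * ones > n then 1 else 0)) 0

-- ===== PRECONDITION & SPEC =====
-- Pre_ excludes exactly the inputs where Python A raises IndexError: the empty list
-- (myList[0]) and lists containing a row shorter than the first row (element[i]).
def Pre_getGammaRate (myList : List String) : Prop :=
  myList ≠ [] ∧ ∀ s ∈ myList, (myList.headD "").toList.length ≤ s.toList.length
instance (myList : List String) : Decidable (Pre_getGammaRate myList) := by unfold Pre_getGammaRate; infer_instance
def pvWitness_getGammaRate : List String := ["0110", "1010", "1110"]
def Spec_getGammaRate (myList : List String) (out : Int) : Prop := out = getGammaRate_alt myList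
instance (myList : List String) (out : Int) : Decidable (Spec_getGammaRate myList out) := by unfold Spec_getGammaRate; infer_instance

-- ===== CLAIM (what is proved, stated in full; the proofs are below) =====
def Claim_equal_getGammaRate : Prop := ∀ (myList : List String), Dom_getGammaRate myList → Pre_getGammaRate myList → Spec_getGammaRate myList (getGammaRate myList)

-- ===== LEMMAS AND PROOFS =====

-- getD after set
lemma getD_set' (l : List Int) (i j : Nat) (v : Int) :
    (l.set i v).getD j 0 = if i = j ∧ i < l.length then v else l.getD j 0 := by
  simp only [List.getD_eq_getElem?_getD, List.getElem?_set]
  split_ifs with h1 h2 h3 <;> (try omega) <;> simp_all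

-- generic "set each index in range w" loop
def updLoop (f : Nat → Int → Int) (g : List Int) (w : Nat) : List Int :=
  (List.range w).foldl (fun g i => g.set i (f i (g.getD i 0))) g

lemma updLoop_length (f : Nat → Int → Int) (g : List Int) (w : Nat) :
    (updLoop f g w).length = g.length := by
  induction w with
  | zero => rfl
  | succ w ih =>
    simp only [updLoop, List.range_succ, List.foldl_append, List.foldl_cons, List.foldl_nil] at ih ⊢
    rw [List.length_set]
    exact ih

lemma updLoop_getD (f : Nat → Int → Int) (g : List Int) (w j : Nat) :
    (updLoop f g w).getD j 0 =
      if j < w ∧ j < g.length then f j (g.getD j 0) else g.getD j 0 := by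
  induction w generalizing j with
  | zero => simp [updLoop]
  | succ w ih =>
    have hlen := updLoop_length f g w
    have hw : (updLoop f g w).getD w 0 = g.getD w 0 := by
      rw [ih w]; simp
    simp only [updLoop, List.range_succ, List.foldl_append, List.foldl_cons, List.foldl_nil]
      at hlen hw ih ⊢
    rw [getD_set', hlen, hw, ih j]
    by_cases hj : j = w
    · subst hj
      by_cases hl : j < g.length
      · rw [if_pos ⟨rfl, hl⟩, if_pos ⟨by omega, hl⟩]
      · rw [if_neg (by omega), if_neg (by omega), if_neg (by omega)]
    · rw [if_neg (fun h => hj h.1.symm)]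
      split_ifs <;> first | rfl | omega

-- A's inner row loop is an updLoop
lemma inner_eq_updLoop (e : String) (g : List Int) (w : Nat) :
    (List.range w).foldl (fun g i =>
        if e.toList.getD i ' ' = '0' then g.set i (g.getD i 0 - 1)
        else g.set i (g.getD i 0 + 1)) g
      = updLoop (fun i x => if e.toList.getD i ' ' = '0' then x - 1 else x + 1) g w := by
  unfold updLoop
  congr 1
  funext g i
  exact (apply_ite (g.set i) _ _ _).symm

-- A's final 0/1 loop is an updLoop
lemma thresh_eq_updLoop (g : List Int) (w : Nat) :
    (List.range w).foldl (fun g index =>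
        if g.getD index 0 ≤ 0 then g.set index 0 else g.set index 1) g
      = updLoop (fun _ x => if x ≤ 0 then (0:Int) else 1) g w := by
  unfold updLoop
  congr 1
  funext g i
  exact (apply_ite (g.set i) _ _ _).symm

-- column sums through the outer row loop
lemma outer_length (w : Nat) (rows : List String) (g : List Int) :
    (rows.foldl (fun gamma element =>
        (List.range w).foldl (fun g i =>
          if element.toList.getD i ' ' = '0' then g.set i (g.getD i 0 - 1)
          else g.set i (g.getD i 0 + 1)) gamma) g).length = g.length := by
  induction rows generalizing g with
  | nil => rfl
  | cons r rs ih =>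
    simp only [List.foldl_cons]
    rw [inner_eq_updLoop, ih, updLoop_length]

lemma outer_getD (w : Nat) (rows : List String) (g : List Int) (j : Nat)
    (hg : g.length = w) (hj : j < w) :
    (rows.foldl (fun gamma element =>
        (List.range w).foldl (fun g i =>
          if element.toList.getD i ' ' = '0' then g.set i (g.getD i 0 - 1)
          else g.set i (g.getD i 0 + 1)) gamma) g).getD j 0
      = g.getD j 0 + ((rows.map (fun e =>
          if e.toList.getD j ' ' = '0' then (-1:Int) else 1)).sum) := by
  induction rows generalizing g with
  | nil => simp
  | cons r rs ih =>
    simp only [List.foldl_cons, List.map_cons, List.sum_cons]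
    rw [inner_eq_updLoop,
        ih _ (by rw [updLoop_length]; exact hg),
        updLoop_getD]
    rw [if_pos ⟨hj, show j < g.length by omega⟩]
    split_ifs <;> ring

-- binToDeci: shifting the start of enumerate doubles the sum
lemma enum_shift (l : List Int) (s : Int) (hs : 0 ≤ s) :
    ((PySem.List.enumerate l (s+1)).map (fun p => p.2 * 2 ^ p.1.toNat)).sum
      = 2 * ((PySem.List.enumerate l s).map (fun p => p.2 * 2 ^ p.1.toNat)).sum := by
  induction l generalizing s with
  | nil => simp [PySem.List.enumerate]
  | cons x t ih =>
    simp only [PySem.List.enumerate, List.map_cons, List.sum_cons]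
    rw [ih (s+1) (by omega)]
    have h1 : (s+1).toNat = s.toNat + 1 := by omega
    rw [h1]
    ring

-- binToDeci is Horner's rule
lemma binToDeci_horner (b : List Int) :
    binToDeci b = b.foldl (fun v x => 2 * v + x) 0 := by
  induction b using List.reverseRecOn with
  | nil => simp [binToDeci]
  | append_singleton c x ih =>
    simp only [binToDeci, List.reverse_append, List.reverse_cons, List.reverse_nil,
      List.nil_append, List.cons_append, List.foldl_append, List.foldl_cons, List.foldl_nil]
    simp only [PySem.List.enumerate, List.map_cons, List.sum_cons]
    rw [enum_shift _ 0 le_rfl]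
    simp only [binToDeci] at ih
    rw [ih]
    simp only [Int.toNat_zero, pow_zero, mul_one]
    ring

-- folding a list with Horner equals folding its indices
lemma foldl_getD (l : List Int) (a : Int) :
    l.foldl (fun v x => 2 * v + x) a
      = (List.range l.length).foldl (fun v i => 2 * v + l.getD i 0) a := by
  induction l using List.reverseRecOn generalizing a with
  | nil => simp
  | append_singleton c x ih =>
    simp only [List.foldl_append, List.foldl_cons, List.foldl_nil, List.length_append,
      List.length_cons, List.length_nil, List.range_succ]
    rw [ih]
    have h1 : (List.range c.length).foldl (fun v i => 2 * v + c.getD i 0) a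
        = (List.range c.length).foldl (fun v i => 2 * v + (c ++ [x]).getD i 0) a := by
      apply PySem.List.foldl_congr_mem
      intro acc i hi
      rw [List.getD_append c [x] 0 i (List.mem_range.mp hi)]
    have h2 : (c ++ [x]).getD c.length 0 = x := by
      rw [List.getD_append_right c [x] 0 c.length le_rfl]
      simp
    rw [h1, h2]

-- the per-column delta sum in terms of B's ones count
lemma sum_d_eq (rows : List String) (j : Nat) :
    (rows.map (fun e => if e.toList.getD j ' ' = '0' then (-1:Int) else 1)).sum
      = 2 * (rows.map (fun row => if row.toList.getD j ' ' ≠ '0' then (1:Int) else 0)).sum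
        - rows.length := by
  induction rows with
  | nil => simp
  | cons r rs ih =>
    simp only [List.map_cons, List.sum_cons, List.length_cons]
    rw [ih]
    by_cases h : r.toList.getD j ' ' = '0' <;>
      simp only [h, if_pos, if_neg, not_true, not_false_iff, ne_eq] <;> push_cast <;> ring

-- ===== VERDICT (by name: the statement is the Claim_ definition above) =====
theorem getGammaRate_spec : Claim_equal_getGammaRate := by
  intro myList _ _
  unfold Spec_getGammaRate getGammaRate getGammaRate_alt
  simp only []
  set w := (PySem.List.pyGetD myList 0 "").toList.length with hw
  set g0 : List Int := (List.range w).map (fun _ => 0) with hg0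
  have hg0len : g0.length = w := by simp [hg0]
  have hg0rep : g0 = List.replicate w 0 := by simp [hg0, List.map_const']
  have hg0D : ∀ j, g0.getD j 0 = 0 := by
    intro j
    rw [hg0rep, List.getD_eq_getElem?_getD, List.getElem?_replicate]
    split_ifs <;> rfl
  set gamma1 := myList.foldl (fun gamma element =>
      (List.range w).foldl (fun g i =>
        if element.toList.getD i ' ' = '0' then g.set i (g.getD i 0 - 1)
        else g.set i (g.getD i 0 + 1)) gamma) g0 with hgamma1
  have h1len : gamma1.length = w := by rw [hgamma1, outer_length, hg0len]
  have h1D : ∀ j < w, gamma1.getD j 0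
      = (myList.map (fun e => if e.toList.getD j ' ' = '0' then (-1:Int) else 1)).sum := by
    intro j hj
    rw [hgamma1, outer_getD w myList g0 j hg0len hj, hg0D, zero_add]
  rw [thresh_eq_updLoop, binToDeci_horner, foldl_getD, updLoop_length, h1len]
  apply PySem.List.foldl_congr_mem
  intro acc i hi
  have hiw : i < w := List.mem_range.mp hi
  congr 1
  rw [updLoop_getD]
  rw [if_pos ⟨by omega, by omega⟩]
  rw [h1D i hiw, sum_d_eq]
  split_ifs <;> omega
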